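-- pv_equiv track=rewrite | github.com/shivamgithubok/SummIndex | advanced_summarization.py | _combine_summary_parts
-- ===== SOURCE A (Python) =====
-- from typing import Dict, Any, List, Optional, Tuple
--
-- def _combine_summary_parts(parts: List[str], target_length: int) -> str:
--     """Combine summary parts into coherent summary"""
--     if not parts:
--         return "Summary not available."
--
--     # Join parts intelligently
--     combined = parts[0]
--     current_length = len(combined.split())
--
--     for part in parts[1:]:
--         part_length = len(part.split())
--         if current_length + part_length <= target_length:
--             # Add connecting words for better flow
--             if not combined.endswith('.'):
--                 combined += '.'
--             combined += ' ' + part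
--             current_length += part_length
--         else:
--             break
--
--     return combined.strip()
-- ===== SOURCE B (Python) =====
-- from typing import List
--
-- def _combine_summary_parts(parts: List[str], target_length: int) -> str:
--     """Combine summary parts into coherent summary (two-phase: cutoff, then join)."""
--     if not parts:
--         return "Summary not available."
--     # phase 1: cumulative word counts decide how many parts are kept
--     counts = [len(p.split()) for p in parts]
--     total = counts[0]
--     k = 1
--     for c in counts[1:]:
--         total += c
--         if total > target_length:
--             break
--         k += 1
--     kept = parts[:k]
--     # phase 2: each separator depends only on the predecessor part
--     pieces = [kept[0]]
--     for prev, cur in zip(kept, kept[1:]):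
--         pieces.append((' ' if prev.endswith('.') else '. ') + cur)
--     return ''.join(pieces).strip()
-- ===== Notes on version B (the rewrite author's own statement) =====
-- stated objective: alternative
-- what changed: Replaces A's single mutate-the-string loop by two phases: a cumulative word-count cutoff choosing the kept prefix, then a join whose separator before each part depends only on the predecessor part (not on the accumulated string).
import Mathlib
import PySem

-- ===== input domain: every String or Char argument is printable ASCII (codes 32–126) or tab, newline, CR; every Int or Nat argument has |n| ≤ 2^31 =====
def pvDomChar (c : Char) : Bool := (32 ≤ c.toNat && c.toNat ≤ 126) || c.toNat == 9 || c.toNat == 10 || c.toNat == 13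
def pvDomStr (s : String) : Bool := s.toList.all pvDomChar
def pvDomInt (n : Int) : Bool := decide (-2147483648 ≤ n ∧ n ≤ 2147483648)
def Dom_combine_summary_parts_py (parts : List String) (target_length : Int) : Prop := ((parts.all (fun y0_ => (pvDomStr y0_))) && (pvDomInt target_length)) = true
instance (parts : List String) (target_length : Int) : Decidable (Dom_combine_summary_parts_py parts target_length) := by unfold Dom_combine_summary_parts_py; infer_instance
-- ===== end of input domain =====

-- B builds the result in two phases (cumulative word-count cutoff, then a join keyed on the
-- predecessor part) instead of A's single loop mutating the accumulated string; same cost.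

-- ===== PORT A =====
-- len(p.split()) as a Python int
def pyWc (p : List Char) : Int := ((PySem.Chars.split₀ p).length : Int)

-- A's for-loop with break: state (combined, current_length)
def aLoop (target : Int) : List (List Char) → List Char → Int → List Char
  | [], combined, _ => combined
  | p :: rest, combined, cur =>
    let pl := pyWc p
    if cur + pl ≤ target then
      let c1 := if ¬ (PySem.Chars.endswith combined ['.'] = true) then combined ++ ['.'] else combined
      aLoop target rest (c1 ++ [' '] ++ p) (cur + pl)
    else combined

def combine_summary_parts_py (parts : List String) (target_length : Int) : String :=
  match parts with
  | [] => "Summary not available."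
  | p0 :: rest =>
    let combined := p0.toList
    String.ofList (PySem.Chars.strip
      (aLoop target_length (rest.map String.toList) combined (pyWc combined)))

-- ===== PORT B =====
-- phase 1 of B: how many parts after the first still fit the cumulative budget
def bCount (target : Int) : List (List Char) → Int → Nat
  | [], _ => 0
  | p :: rest, total =>
    let t := total + pyWc p
    if t > target then 0 else 1 + bCount target rest t

-- phase 2 of B: separator before `cur`, decided by the predecessor part alone
def bSep (prev cur : List Char) : List Char :=
  (if PySem.Chars.endswith prev ['.'] = true then [' '] else ['.', ' ']) ++ cur

def combine_summary_parts_py_alt (parts : List String) (target_length : Int) : String :=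
  match parts with
  | [] => "Summary not available."
  | p0 :: rest =>
    let first := p0.toList
    let tailL := rest.map String.toList
    let keptTail := tailL.take (bCount target_length tailL (pyWc first))
    let pieces := first :: ((first :: keptTail).zip keptTail).map (fun pr => bSep pr.1 pr.2)
    String.ofList (PySem.Chars.strip (PySem.Chars.join [] pieces))

-- ===== PRECONDITION & SPEC =====
def Spec_combine_summary_parts_py (parts : List String) (target_length : Int) (out : String) : Prop := out = combine_summary_parts_py_alt parts target_length
instance (parts : List String) (target_length : Int) (out : String) : Decidable (Spec_combine_summary_parts_py parts target_length out) := by unfold Spec_combine_summary_parts_py; infer_instance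

-- ===== CLAIM (what is proved, stated in full; the proofs are below) =====
def Claim_equal_combine_summary_parts_py : Prop := ∀ (parts : List String) (target_length : Int), Dom_combine_summary_parts_py parts target_length → Spec_combine_summary_parts_py parts target_length (combine_summary_parts_py parts target_length)

-- ===== LEMMAS AND PROOFS =====

-- a singleton suffix is the last element
theorem endswith_singleton (l : List Char) (c : Char) :
    PySem.Chars.endswith l [c] = true ↔ l.getLast? = some c := by
  rw [PySem.Chars.endswith_iff]
  constructor
  · rintro ⟨t, rfl⟩
    simp [List.getLast?_append]
  · intro h
    rcases l.eq_nil_or_concat with rfl | ⟨ys, y, rfl⟩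
    · simp at h
    · simp [List.getLast?_append] at h
      exact ⟨ys, by simp [h]⟩

theorem endswith_sep (xs p : List Char) :
    PySem.Chars.endswith (xs ++ ' ' :: p) ['.'] = PySem.Chars.endswith p ['.'] := by
  apply Bool.eq_iff_iff.mpr
  simp only [endswith_singleton]
  rcases p.eq_nil_or_concat with rfl | ⟨ys, y, rfl⟩
  · simp [List.getLast?_append]
  · rw [List.concat_eq_append, show xs ++ ' ' :: (ys ++ [y]) = (xs ++ ' ' :: ys) ++ [y] by simp,
      List.getLast?_concat, List.getLast?_concat]

theorem join_nil_cons (x : List Char) (l : List (List Char)) :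
    PySem.Chars.join [] (x :: l) = x ++ PySem.Chars.join [] l := by
  cases l with
  | nil => simp [PySem.Chars.join, List.intercalate]
  | cons y ys => simp [PySem.Chars.join, List.intercalate, List.intersperse]

theorem loop_eq (target : Int) : ∀ (rest : List (List Char)) (combined prev : List Char) (cur : Int),
    PySem.Chars.endswith combined ['.'] = PySem.Chars.endswith prev ['.'] →
    aLoop target rest combined cur =
      combined ++ PySem.Chars.join []
        (((prev :: rest.take (bCount target rest cur)).zip (rest.take (bCount target rest cur))).map
          (fun pr => bSep pr.1 pr.2)) := by
  intro rest
  induction rest with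
  | nil =>
    intro combined prev cur _
    simp [aLoop, bCount, PySem.Chars.join, List.intercalate]
  | cons p rest ih =>
    intro combined prev cur h
    simp only [aLoop, bCount]
    by_cases hle : cur + pyWc p ≤ target
    · have hng : ¬ cur + pyWc p > target := by omega
      rw [if_pos hle, if_neg hng]
      have hc1 : (if ¬ (PySem.Chars.endswith combined ['.'] = true) then combined ++ ['.'] else combined) ++ [' '] ++ p
          = combined ++ bSep prev p := by
        rw [h]; unfold bSep
        by_cases hp : PySem.Chars.endswith prev ['.'] = true <;> simp [hp]
      rw [hc1]
      have hend : PySem.Chars.endswith (combined ++ bSep prev p) ['.'] = PySem.Chars.endswith p ['.'] := by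
        unfold bSep
        by_cases hp : PySem.Chars.endswith prev ['.'] = true
        · simpa [hp] using endswith_sep combined p
        · simpa [hp, List.append_assoc] using endswith_sep (combined ++ ['.']) p
      rw [ih (combined ++ bSep prev p) p (cur + pyWc p) hend,
        Nat.add_comm 1 _, List.take_succ_cons, List.zip_cons_cons, List.map_cons, join_nil_cons,
        List.append_assoc]
    · have hg : cur + pyWc p > target := by omega
      rw [if_neg hle, if_pos hg]
      simp [PySem.Chars.join, List.intercalate]

-- ===== VERDICT (by name: the statement is the Claim_ definition above) =====
theorem combine_summary_parts_py_spec : Claim_equal_combine_summary_parts_py := by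
  intro parts target _
  unfold Spec_combine_summary_parts_py combine_summary_parts_py combine_summary_parts_py_alt
  cases parts with
  | nil => rfl
  | cons p0 rest =>
    simp only
    rw [loop_eq target (rest.map String.toList) p0.toList p0.toList (pyWc p0.toList) rfl,
        join_nil_cons]
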